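-- pv_equiv track=rewrite | github.com/fuubian/Advent_of_Code | puzzle_scripts/puzzle_day_09.py | locate_empty_blocks
-- ===== SOURCE A (Python) =====
-- def locate_empty_blocks(disk_map, end_index):
--     empty_blocks = []
--     found_block = False
--     index_start = None
--     for i in range(end_index):
--         if not found_block and disk_map[i] == '.':
--             index_start = i
--             found_block = True
--         elif found_block and disk_map[i] != '.':
--             end_index = i
--             found_block = False
--             empty_blocks.append((index_start, end_index))
--     return empty_blocks
-- ===== SOURCE B (Python) =====
-- def locate_empty_blocks(disk_map, end_index):
--     is_dot = [s == '.' for s in disk_map[:max(end_index, 0)]]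
--     flags = list(zip([False] + is_dot, is_dot))
--     starts = [i for i, (prev, cur) in enumerate(flags) if cur and not prev]
--     ends = [i for i, (prev, cur) in enumerate(flags) if prev and not cur]
--     return list(zip(starts, ends))
-- ===== Notes on version B (the rewrite author's own statement) =====
-- stated objective: alternative
-- what changed: Replaces A's single-pass found_block/index_start state machine with a declarative computation: build (prev, cur) boolean pairs over the scanned prefix, collect run-start and run-end indices by comprehension, and zip them (zip truncation drops the trailing unterminated run exactly as A does).
import Mathlib
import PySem

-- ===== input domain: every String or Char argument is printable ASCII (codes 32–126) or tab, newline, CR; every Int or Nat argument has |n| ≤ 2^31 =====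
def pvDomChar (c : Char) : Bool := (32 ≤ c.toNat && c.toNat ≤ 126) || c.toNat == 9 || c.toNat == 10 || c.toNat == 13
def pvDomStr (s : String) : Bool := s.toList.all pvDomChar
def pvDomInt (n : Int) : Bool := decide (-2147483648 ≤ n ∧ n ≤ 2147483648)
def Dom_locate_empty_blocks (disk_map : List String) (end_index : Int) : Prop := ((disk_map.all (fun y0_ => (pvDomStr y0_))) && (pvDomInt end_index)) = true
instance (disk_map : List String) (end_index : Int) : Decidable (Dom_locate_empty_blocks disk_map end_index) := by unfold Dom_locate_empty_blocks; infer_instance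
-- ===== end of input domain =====

-- B replaces A's one-pass found_block state machine by a declarative boundary
-- computation (mark run starts and run ends via (prev, cur) pairs, then zip);
-- objective: alternative (same cost, different algorithm). Return value only; no mutation.

-- ===== PORT A =====
-- one loop step of A: state = (empty_blocks, found_block, index_start)
def aStep (disk_map : List String) (st : List (Int × Int) × Bool × Option Int) (i : Int) :
    List (Int × Int) × Bool × Option Int :=
  let eb := st.1
  let fb := st.2.1
  let is := st.2.2
  let x := PySem.List.pyGetD disk_map i ""
  if !fb && (x == ".") then (eb, true, some i)
  else if fb && !(x == ".") then (eb ++ [(is.getD 0, i)], false, is)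
  else (eb, fb, is)

def locate_empty_blocks (disk_map : List String) (end_index : Int) : List (Int × Int) :=
  ((PySem.List.pyRange 0 end_index 1).foldl (aStep disk_map)
    ([], false, (none : Option Int))).1

-- ===== PORT B =====
def locate_empty_blocks_alt (disk_map : List String) (end_index : Int) : List (Int × Int) :=
  let isDot := (PySem.List.slice disk_map none (some (max end_index 0))).map (fun s => s == ".")
  let flags := (false :: isDot).zip isDot
  let starts := (PySem.List.enumerate flags 0).filterMap
    (fun p => if p.2.2 && !p.2.1 then some p.1 else none)
  let ends := (PySem.List.enumerate flags 0).filterMap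
    (fun p => if p.2.1 && !p.2.2 then some p.1 else none)
  starts.zip ends

-- ===== PRECONDITION & SPEC =====
-- A indexes disk_map[i] for every i in range(end_index), so it raises IndexError
-- exactly when end_index exceeds len(disk_map); those inputs are excluded.
def Pre_locate_empty_blocks (disk_map : List String) (end_index : Int) : Prop :=
  end_index ≤ (disk_map.length : Int)
instance (disk_map : List String) (end_index : Int) : Decidable (Pre_locate_empty_blocks disk_map end_index) := by unfold Pre_locate_empty_blocks; infer_instance

def pvWitness_locate_empty_blocks : List String × Int := ([".", "a", ".", "."], 4)

def Spec_locate_empty_blocks (disk_map : List String) (end_index : Int) (out : List (Int × Int)) : Prop := out = locate_empty_blocks_alt disk_map end_index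
instance (disk_map : List String) (end_index : Int) (out : List (Int × Int)) : Decidable (Spec_locate_empty_blocks disk_map end_index out) := by unfold Spec_locate_empty_blocks; infer_instance

-- ===== CLAIM (what is proved, stated in full; the proofs are below) =====
def Claim_equal_locate_empty_blocks : Prop := ∀ (disk_map : List String) (end_index : Int), Dom_locate_empty_blocks disk_map end_index → Pre_locate_empty_blocks disk_map end_index → Spec_locate_empty_blocks disk_map end_index (locate_empty_blocks disk_map end_index)

-- ===== LEMMAS AND PROOFS =====

-- common denominator: the run state machine on the boolean ('is a dot') prefix
def sm (bs : List Bool) (p : Int) (fb : Bool) (s : Int) : List (Int × Int) :=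
  match bs with
  | [] => []
  | b :: t =>
    if fb then (if b then sm t (p + 1) true s else (s, p) :: sm t (p + 1) false s)
    else (if b then sm t (p + 1) true p else sm t (p + 1) false s)

-- recursive forms of B's starts/ends lists
def stR (bs : List Bool) (p : Int) (prev : Bool) : List Int :=
  match bs with
  | [] => []
  | b :: t => if b && !prev then p :: stR t (p + 1) b else stR t (p + 1) b

def enR (bs : List Bool) (p : Int) (prev : Bool) : List Int :=
  match bs with
  | [] => []
  | b :: t => if prev && !b then p :: enR t (p + 1) b else enR t (p + 1) b

lemma foldA (disk_map : List String) :
    ∀ (k : Nat) (p : Int) (acc : List (Int × Int)) (fb : Bool) (is : Option Int),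
      0 ≤ p → p.toNat + k ≤ disk_map.length →
      ((PySem.List.pyRange p (p + (k : Int)) 1).foldl (aStep disk_map) (acc, fb, is)).1
        = acc ++ sm (((disk_map.drop p.toNat).take k).map (fun s => s == ".")) p fb (is.getD 0) := by
  intro k
  induction k with
  | zero =>
    intro p acc fb is hp hlen
    rw [show p + ((0 : Nat) : Int) = p by omega, PySem.List.pyRange_one_eq_nil (le_refl p)]
    simp [sm]
  | succ k ih =>
    intro p acc fb is hp hlen
    have hlt : p.toNat < disk_map.length := by omega
    rw [PySem.List.pyRange_one_cons (by omega : p < p + ((k + 1 : Nat) : Int))]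
    have hrange : p + ((k + 1 : Nat) : Int) = (p + 1) + (k : Int) := by push_cast; ring
    rw [hrange]
    have hdrop : disk_map.drop p.toNat = disk_map[p.toNat] :: disk_map.drop (p.toNat + 1) :=
      List.drop_eq_getElem_cons hlt
    have htn : (p + 1).toNat = p.toNat + 1 := by omega
    have hget : PySem.List.pyGetD disk_map p "" = disk_map[p.toNat] :=
      PySem.List.pyGetD_eq_getElem disk_map "" hp (by omega)
    rw [List.foldl_cons, hdrop]
    simp only [List.take_succ_cons, List.map_cons]
    by_cases hb : disk_map[p.toNat] == "."
    · cases fb with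
      | false =>
        rw [show aStep disk_map (acc, false, is) p = (acc, true, some p) by
          simp [aStep, hget, hb]]
        rw [ih (p + 1) acc true (some p) (by omega) (by omega)]
        simp [sm, hb, htn]
      | true =>
        rw [show aStep disk_map (acc, true, is) p = (acc, true, is) by
          simp [aStep, hget, hb]]
        rw [ih (p + 1) acc true is (by omega) (by omega)]
        simp [sm, hb, htn]
    · cases fb with
      | false =>
        rw [show aStep disk_map (acc, false, is) p = (acc, false, is) by
          simp [aStep, hget, hb]]
        rw [ih (p + 1) acc false is (by omega) (by omega)]
        simp [sm, hb, htn]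
      | true =>
        rw [show aStep disk_map (acc, true, is) p = (acc ++ [(is.getD 0, p)], false, is) by
          simp [aStep, hget, hb]]
        rw [ih (p + 1) (acc ++ [(is.getD 0, p)]) false is (by omega) (by omega)]
        simp [sm, hb, htn]

lemma startsEq : ∀ (bs : List Bool) (prev : Bool) (k : Int),
    (PySem.List.enumerate ((prev :: bs).zip bs) k).filterMap
        (fun p => if p.2.2 && !p.2.1 then some p.1 else none)
      = stR bs k prev := by
  intro bs
  induction bs with
  | nil => intro prev k; rfl
  | cons b t ih =>
    intro prev k
    rw [show (prev :: b :: t).zip (b :: t) = (prev, b) :: ((b :: t).zip t) from rfl,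
        PySem.List.enumerate_cons, List.filterMap_cons]
    rw [show (((k, prev, b) : Int × Bool × Bool).2.2 && !((k, prev, b) : Int × Bool × Bool).2.1)
          = (b && !prev) from rfl]
    rw [show stR (b :: t) k prev
          = if b && !prev then k :: stR t (k + 1) b else stR t (k + 1) b from rfl]
    rw [ih b (k + 1)]
    by_cases hc : b && !prev
    · rw [if_pos hc, if_pos hc]
    · rw [if_neg hc, if_neg hc]

lemma endsEq : ∀ (bs : List Bool) (prev : Bool) (k : Int),
    (PySem.List.enumerate ((prev :: bs).zip bs) k).filterMap
        (fun p => if p.2.1 && !p.2.2 then some p.1 else none)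
      = enR bs k prev := by
  intro bs
  induction bs with
  | nil => intro prev k; rfl
  | cons b t ih =>
    intro prev k
    rw [show (prev :: b :: t).zip (b :: t) = (prev, b) :: ((b :: t).zip t) from rfl,
        PySem.List.enumerate_cons, List.filterMap_cons]
    rw [show (((k, prev, b) : Int × Bool × Bool).2.1 && !((k, prev, b) : Int × Bool × Bool).2.2)
          = (prev && !b) from rfl]
    rw [show enR (b :: t) k prev
          = if prev && !b then k :: enR t (k + 1) b else enR t (k + 1) b from rfl]
    rw [ih b (k + 1)]
    by_cases hc : prev && !b
    · rw [if_pos hc, if_pos hc]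
    · rw [if_neg hc, if_neg hc]

lemma zipSE : ∀ (bs : List Bool) (p : Int),
    (∀ s : Int, (stR bs p false).zip (enR bs p false) = sm bs p false s)
    ∧ (∀ s : Int, (s :: stR bs p true).zip (enR bs p true) = sm bs p true s) := by
  intro bs
  induction bs with
  | nil => intro p; exact ⟨fun s => by simp [stR, enR, sm], fun s => by simp [stR, enR, sm]⟩
  | cons b t ih =>
    intro p
    constructor
    · intro s
      cases b with
      | true => simpa [stR, enR, sm] using (ih (p + 1)).2 p
      | false => simpa [stR, enR, sm] using (ih (p + 1)).1 s
    · intro s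
      cases b with
      | true => simpa [stR, enR, sm] using (ih (p + 1)).2 s
      | false => simpa [stR, enR, sm] using (ih (p + 1)).1 s

lemma alt_eq_sm (disk_map : List String) (end_index : Int) :
    locate_empty_blocks_alt disk_map end_index
      = sm ((disk_map.take (max end_index 0).toNat).map (fun s => s == ".")) 0 false 0 := by
  have hD : locate_empty_blocks_alt disk_map end_index
      = ((PySem.List.enumerate ((false :: ((PySem.List.slice disk_map none (some (max end_index 0))).map (fun s => s == "."))).zip
            ((PySem.List.slice disk_map none (some (max end_index 0))).map (fun s => s == "."))) 0).filterMap
          (fun p => if p.2.2 && !p.2.1 then some p.1 else none)).zip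
        ((PySem.List.enumerate ((false :: ((PySem.List.slice disk_map none (some (max end_index 0))).map (fun s => s == "."))).zip
            ((PySem.List.slice disk_map none (some (max end_index 0))).map (fun s => s == "."))) 0).filterMap
          (fun p => if p.2.1 && !p.2.2 then some p.1 else none)) := rfl
  rw [hD, show PySem.List.slice disk_map none (some (max end_index 0))
        = disk_map.take (max end_index 0).toNat from
      PySem.List.slice_to disk_map (le_max_right end_index 0), startsEq, endsEq]
  exact (zipSE _ 0).1 0

-- ===== VERDICT (by name: the statement is the Claim_ definition above) =====
theorem locate_empty_blocks_spec : Claim_equal_locate_empty_blocks := by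
  intro disk_map end_index _ hpre
  unfold Spec_locate_empty_blocks
  unfold Pre_locate_empty_blocks at hpre
  rw [alt_eq_sm]
  unfold locate_empty_blocks
  by_cases he : end_index ≤ 0
  · rw [PySem.List.pyRange_one_eq_nil he]
    rw [show max end_index 0 = 0 by omega]
    simp [sm]
  · have h0 : (0 : Int) + ((end_index.toNat : Nat) : Int) = end_index := by omega
    have := foldA disk_map end_index.toNat 0 [] false none (le_refl 0) (by omega)
    rw [h0] at this
    rw [this]
    rw [show max end_index 0 = end_index by omega]
    simp
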